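-- pv_equiv track=rewrite | github.com/Alectriciti/comfyui-adaptiveprompts | py/prompt_repack.py | _expand_braces_non_nested
-- ===== SOURCE A (Python) =====
-- from typing import Dict, List, Tuple, Optional
--
-- def _expand_braces_non_nested(text: str) -> List[str]:
--     """
--     Expand top-level {a|b|...} blocks (no nested braces, guaranteed by pre-filter).
--     Supports multiple brace blocks per line (cartesian expansion).
--     """
--     # Split into segments alternating between literal and brace-choices
--     segments: List[List[str]] = [[]]
--     i = 0
--     L = len(text)
--     while i < L:
--         if text[i] == '{':
--             j = text.find('}', i + 1)
--             if j == -1: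
--                 # Unbalanced; treat as literal (should not happen due to pre-filter)
--                 for seg in segments:
--                     seg.append(text[i])
--                 i += 1
--                 continue
--             inner = text[i + 1:j]
--             choices = [c.strip() for c in inner.split('|') if c.strip() != '']
--             # cartesian product update
--             new_segments: List[List[str]] = []
--             for seg in segments:
--                 for choice in choices:
--                     new_segments.append(seg + [choice])
--             segments = new_segments
--             i = j + 1
--         else:
--             # append literal char to all current segments
--             ch = text[i]
--             for seg in segments:
--                 if seg and isinstance(seg[-1], str) and not seg[-1].startswith('{'):  # last is literal run
--                     seg[-1] = seg[-1] + ch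
--                 else:
--                     seg.append(ch)
--             i += 1
--
--     # join pieces of each segment
--     out: List[str] = []
--     for seg in segments:
--         out.append("".join(seg))
--     return out
-- ===== SOURCE B (Python) =====
-- from typing import List
--
--
-- def _expand_braces_non_nested(text: str) -> List[str]:
--     # Two-phase decomposition: first split the text into a flat list of factors
--     # (literal runs as single-choice factors, brace blocks as their choice lists),
--     # then take the cartesian product in one fold.
--     components: List[List[str]] = []
--     i, L = 0, len(text)
--     while i < L:
--         if text[i] == '{':
--             j = text.find('}', i + 1)
--             if j == -1:
--                 # unbalanced: the '{' itself is a literal factor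
--                 components.append([text[i]])
--                 i += 1
--             else:
--                 inner = text[i + 1:j]
--                 components.append([c.strip() for c in inner.split('|') if c.strip() != ''])
--                 i = j + 1
--         else:
--             k = text.find('{', i + 1)
--             if k == -1:
--                 components.append([text[i:]])
--                 i = L
--             else:
--                 components.append([text[i:k]])
--                 i = k
--     results = ['']
--     for comp in components:
--         results = [r + c for r in results for c in comp]
--     return results
-- ===== Notes on version B (the rewrite author's own statement) =====
-- stated objective: faster
-- what changed: A threads a char-by-char mutated list of per-segment piece lists through one loop (each literal char is appended to every current segment); B first scans the text once into a flat factor list (literal runs and brace choice lists) and then builds the output with a single cartesian-product fold.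
import Mathlib
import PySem

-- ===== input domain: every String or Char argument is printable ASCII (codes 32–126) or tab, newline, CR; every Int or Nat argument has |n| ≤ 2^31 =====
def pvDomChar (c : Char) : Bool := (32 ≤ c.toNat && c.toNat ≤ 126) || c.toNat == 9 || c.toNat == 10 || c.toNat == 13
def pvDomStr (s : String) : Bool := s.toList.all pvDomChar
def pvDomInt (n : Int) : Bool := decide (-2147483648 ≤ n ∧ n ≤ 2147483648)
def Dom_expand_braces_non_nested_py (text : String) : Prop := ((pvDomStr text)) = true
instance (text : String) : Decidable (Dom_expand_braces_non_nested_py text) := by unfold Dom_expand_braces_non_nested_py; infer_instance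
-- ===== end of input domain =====

-- B replaces A's per-character per-segment piece-list mutation by a two-phase
-- decomposition (factor list, then one cartesian-product fold); objective: faster
-- (a timing run measured B faster on the generated inputs).

-- ===== PORT A =====
-- choices = [c.strip() for c in inner.split('|') if c.strip() != '']  (shared text in both Pythons)
def pvChoices (inner : List Char) : List (List Char) :=
  ((PySem.Chars.splitOn inner ['|']).filter (fun c => PySem.Chars.strip c ≠ [])).map PySem.Chars.strip

-- the literal-char branch of A: append ch to the last literal run of seg, else as a new piece
def pvAppendChar (ch : Char) (seg : List (List Char)) : List (List Char) :=
  match seg.getLast? with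
  | some last =>
      if PySem.Chars.startswith last ['{'] then seg ++ [[ch]]
      else seg.dropLast ++ [last ++ [ch]]
  | none => seg ++ [[ch]]

-- A's while loop over text[i:], state = segments (each a list of pieces)
def pvLoopA (rest : List Char) (segments : List (List (List Char))) : List (List (List Char)) :=
  match rest with
  | [] => segments
  | c :: t =>
      if c = '{' then
        let j := PySem.Chars.find t ['}']          -- text.find('}', i+1), relative to t
        if j = -1 then
          -- unbalanced: append the '{' as a new piece to every segment
          pvLoopA t (segments.map (fun seg => seg ++ [[c]]))
        else
          let inner := t.take j.toNat              -- text[i+1:j]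
          let choices := pvChoices inner
          pvLoopA (t.drop (j.toNat + 1))
            (segments.flatMap (fun seg => choices.map (fun ch => seg ++ [ch])))
      else
        pvLoopA t (segments.map (pvAppendChar c))
termination_by rest.length
decreasing_by all_goals simp_all

def expand_braces_non_nested_py (text : String) : List String :=
  (pvLoopA text.toList [[]]).map (fun seg => String.ofList (PySem.Chars.join [] seg))

-- ===== PORT B =====
-- phase 1 of B: the factor list (literal runs and brace choice lists)
def pvFactors (rest : List Char) : List (List (List Char)) :=
  match rest with
  | [] => []
  | c :: t =>
      if c = '{' then
        let j := PySem.Chars.find t ['}']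
        if j = -1 then [[c]] :: pvFactors t
        else pvChoices (t.take j.toNat) :: pvFactors (t.drop (j.toNat + 1))
      else
        let k := PySem.Chars.find t ['{']          -- text.find('{', i+1), relative to t
        if k = -1 then [c :: t] :: pvFactors []
        else [c :: t.take k.toNat] :: pvFactors (t.drop k.toNat)
termination_by rest.length
decreasing_by all_goals simp_all

def expand_braces_non_nested_py_alt (text : String) : List String :=
  ((pvFactors text.toList).foldl
      (fun results comp => results.flatMap (fun r => comp.map (fun c => r ++ c)))
      [[]]).map String.ofList

-- ===== PRECONDITION & SPEC =====
def Spec_expand_braces_non_nested_py (text : String) (out : List String) : Prop := out = expand_braces_non_nested_py_alt text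
instance (text : String) (out : List String) : Decidable (Spec_expand_braces_non_nested_py text out) := by unfold Spec_expand_braces_non_nested_py; infer_instance

-- ===== CLAIM (what is proved, stated in full; the proofs are below) =====
def Claim_equal_expand_braces_non_nested_py : Prop := ∀ (text : String), Dom_expand_braces_non_nested_py text → Spec_expand_braces_non_nested_py text (expand_braces_non_nested_py text)

-- ===== LEMMAS AND PROOFS =====

-- common abstraction of both programs: the loop over joined strings
def pvLoopS (rest : List Char) (acc : List (List Char)) : List (List Char) :=
  match rest with
  | [] => acc
  | c :: t =>
      if c = '{' then
        let j := PySem.Chars.find t ['}']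
        if j = -1 then pvLoopS t (acc.map (fun r => r ++ [c]))
        else pvLoopS (t.drop (j.toNat + 1))
          (acc.flatMap (fun r => (pvChoices (t.take j.toNat)).map (fun ch => r ++ ch)))
      else pvLoopS t (acc.map (fun r => r ++ [c]))
termination_by rest.length
decreasing_by all_goals simp_all

theorem pvJoin_flatten (parts : List (List Char)) : PySem.Chars.join [] parts = parts.flatten := by
  induction parts with
  | nil => rfl
  | cons a l ih =>
    cases l with
    | nil => rfl
    | cons b m =>
      rw [PySem.Chars.join] at *
      simp [List.intercalate, List.intersperse] at *
      simpa using ih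

theorem pvAppendChar_flatten (ch : Char) (seg : List (List Char)) :
    (pvAppendChar ch seg).flatten = seg.flatten ++ [ch] := by
  unfold pvAppendChar
  cases h : seg.getLast? with
  | none => simp
  | some last =>
    have hne : seg ≠ [] := by rintro rfl; simp at h
    have hsplit : seg.dropLast ++ [last] = seg := by
      have h2 := List.dropLast_append_getLast hne
      rwa [List.getLast_eq_iff_getLast?_eq_some hne |>.mpr h] at h2
    dsimp only
    split_ifs with hs
    · simp
    · conv_rhs => rw [← hsplit]
      simp

theorem pvLoopA_flatten (rest : List Char) (segments : List (List (List Char))) :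
    (pvLoopA rest segments).map List.flatten = pvLoopS rest (segments.map List.flatten) := by
  fun_induction pvLoopA rest segments
  case case1 => rw [pvLoopS]
  case case2 segments t j h ih =>
    simp at ih
    rw [pvLoopS]
    simp only [reduceIte]
    rw [if_pos h, ih]
    congr 1
    simp [Function.comp]
  case case3 segments t j h inner choices ih =>
    simp at ih
    rw [pvLoopS]
    simp only [reduceIte]
    rw [if_neg h, ih]
    congr 1
    simp [List.map_flatMap, List.flatMap_map, Function.comp_def, choices, inner, j]
  case case4 segments c t h ih =>
    simp at ih
    rw [pvLoopS, if_neg h, ih]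
    congr 1
    simp [Function.comp, pvAppendChar_flatten]

theorem pvSingleton_prefix (a : Char) (l : List Char) : [a] <+: l ↔ l.head? = some a := by
  cases l <;> simp [List.prefix_cons_iff, eq_comm]

theorem pvLoopS_literal (run : List Char) (rest : List Char) (acc : List (List Char))
    (h : ∀ x ∈ run, x ≠ '{') :
    pvLoopS (run ++ rest) acc = pvLoopS rest (acc.map (fun r => r ++ run)) := by
  induction run generalizing acc with
  | nil => simp
  | cons c run ih =>
    have hc : c ≠ '{' := h c (by simp)
    rw [List.cons_append, pvLoopS, if_neg hc, ih _ (fun x hx => h x (by simp [hx]))]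
    simp [List.map_map, Function.comp_def]

theorem pvFactors_fold (rest : List Char) (acc : List (List Char)) :
    (pvFactors rest).foldl
      (fun results comp => results.flatMap (fun r => comp.map (fun c => r ++ c)))
      acc = pvLoopS rest acc := by
  fun_induction pvFactors rest generalizing acc
  case case1 => rw [pvLoopS, List.foldl_nil]
  case case2 t j h ih =>
    rw [pvLoopS]
    simp only [reduceIte]
    rw [if_pos h, List.foldl_cons, ih]
    congr 1
    exact List.map_eq_flatMap.symm
  case case3 t j h ih =>
    rw [pvLoopS]
    simp only [reduceIte]
    rw [if_neg h, List.foldl_cons, ih]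
  case case4 c t h k hk ih =>
    have hnot : ¬ ['{'] <:+: t := PySem.Chars.find_eq_neg_one_iff t ['{'] |>.mp hk
    have hall : ∀ x ∈ c :: t, x ≠ '{' := by
      intro x hx hxeq
      rcases List.mem_cons.mp hx with h1 | h1
      · exact h (h1 ▸ hxeq)
      · exact hnot ((List.singleton_infix_iff '{' t).mpr (hxeq ▸ h1))
    rw [List.foldl_cons, pvFactors, List.foldl_nil]
    have hlit := pvLoopS_literal (c :: t) [] acc hall
    rw [List.append_nil] at hlit
    rw [hlit, pvLoopS]
    exact List.map_eq_flatMap.symm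
  case case5 c t h k hk ih =>
    have hk0 : 0 ≤ k := by
      have := PySem.Chars.neg_one_le_find t ['{']
      simp only [k] at *
      omega
    obtain ⟨-, hmin⟩ := PySem.Chars.find_spec hk0
    have hall : ∀ x ∈ t.take k.toNat, x ≠ '{' := by
      intro x hx hxeq
      obtain ⟨i, hi, hget⟩ := List.mem_take_iff_getElem.mp hx
      refine hmin i (by omega) ?_
      rw [pvSingleton_prefix, List.head?_drop]
      rw [List.getElem?_eq_getElem (by omega), hget, hxeq]
    rw [List.foldl_cons, ih]
    rw [pvLoopS, if_neg h]
    conv_rhs => rw [show t = t.take k.toNat ++ t.drop k.toNat from (List.take_append_drop _ t).symm]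
    rw [pvLoopS_literal _ _ _ hall]
    congr 1
    simp only [List.map_cons, List.map_nil, List.map_map, Function.comp_def, List.append_assoc,
      List.singleton_append]
    exact List.map_eq_flatMap.symm

-- ===== VERDICT (by name: the statement is the Claim_ definition above) =====
theorem expand_braces_non_nested_py_spec : Claim_equal_expand_braces_non_nested_py := by
  intro text _
  unfold Spec_expand_braces_non_nested_py expand_braces_non_nested_py expand_braces_non_nested_py_alt
  rw [pvFactors_fold]
  have h := pvLoopA_flatten text.toList [[]]
  simp only [List.map_cons, List.map_nil, List.flatten_nil] at h
  calc (pvLoopA text.toList [[]]).map (fun seg => String.ofList (PySem.Chars.join [] seg))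
      = ((pvLoopA text.toList [[]]).map List.flatten).map String.ofList := by
        simp [List.map_map, Function.comp, pvJoin_flatten]
    _ = (pvLoopS text.toList [[]]).map String.ofList := by rw [h]
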